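-- pv_equiv track=rewrite | github.com/Shiroari175/rakuten-review-system | rakutenproject/reviewapp/views.py | output_evaluation_to_star
-- ===== SOURCE A (Python) =====
-- def output_evaluation_to_star(evaluation):
--     """
--     評価１～５を☆の数に変換して返す
--     :param evaluation:
--     :return: star
--     """
--     e = 0
--     star = ""
--     while e < 5:
--         if e < int(evaluation):
--             star += "★"
--         else:
--             star += "☆"
--         e += 1
--     return star
-- ===== SOURCE B (Python) =====
-- def output_evaluation_to_star(evaluation):
--     """Closed form: clamp the rating into [0,5] once, then build both runs by string multiplication."""
--     n = max(0, min(5, int(evaluation)))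
--     return "★" * n + "☆" * (5 - n)
-- ===== Notes on version B (the rewrite author's own statement) =====
-- stated objective: simpler
-- what changed: Replaced the 5-step while loop with a per-position branch by a closed form: clamp the rating into [0,5] once and concatenate '★'*n with '☆'*(5-n).
import Mathlib
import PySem

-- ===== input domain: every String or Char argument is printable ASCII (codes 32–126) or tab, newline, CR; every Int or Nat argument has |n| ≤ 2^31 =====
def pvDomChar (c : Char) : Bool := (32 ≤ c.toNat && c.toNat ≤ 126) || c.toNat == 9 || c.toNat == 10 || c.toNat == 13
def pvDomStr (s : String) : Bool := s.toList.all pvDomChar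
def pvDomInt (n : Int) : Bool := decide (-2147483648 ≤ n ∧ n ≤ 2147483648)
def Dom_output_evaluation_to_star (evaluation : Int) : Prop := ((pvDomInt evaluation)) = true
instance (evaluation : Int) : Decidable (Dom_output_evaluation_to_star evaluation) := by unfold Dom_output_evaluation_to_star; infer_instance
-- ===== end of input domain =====

-- B replaces A's 5-step while loop (per-position branch) by a closed form: clamp into [0,5], concatenate two runs; objective: simpler.

-- ===== PORT A =====
-- the while loop runs exactly while e < 5, e starting at 0 and stepping by 1;
-- fuel = number of remaining iterations (5 - e), which makes the recursion structural
def output_evaluation_to_star_loop (evaluation : Int) : Nat → Int → String → String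
  | 0, _, star => star
  | fuel + 1, e, star =>
      output_evaluation_to_star_loop evaluation fuel (e + 1)
        (star ++ (if e < evaluation then "★" else "☆"))

def output_evaluation_to_star (evaluation : Int) : String :=
  output_evaluation_to_star_loop evaluation 5 0 ""

-- ===== PORT B =====
def output_evaluation_to_star_alt (evaluation : Int) : String :=
  let n : Int := max 0 (min 5 evaluation)
  String.mk (List.replicate n.toNat '★') ++ String.mk (List.replicate (5 - n.toNat) '☆')

-- ===== PRECONDITION & SPEC =====
def Spec_output_evaluation_to_star (evaluation : Int) (out : String) : Prop := out = output_evaluation_to_star_alt evaluation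
instance (evaluation : Int) (out : String) : Decidable (Spec_output_evaluation_to_star evaluation out) := by unfold Spec_output_evaluation_to_star; infer_instance

-- ===== CLAIM (what is proved, stated in full; the proofs are below) =====
def Claim_equal_output_evaluation_to_star : Prop := ∀ (evaluation : Int), Dom_output_evaluation_to_star evaluation → Spec_output_evaluation_to_star evaluation (output_evaluation_to_star evaluation)

-- ===== LEMMAS AND PROOFS =====
theorem output_evaluation_to_star_cases (evaluation : Int) :
    output_evaluation_to_star evaluation = output_evaluation_to_star_alt evaluation := by
  rcases (by omega : evaluation ≤ 0 ∨ 0 < evaluation) with h | h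
  · have e0 : ¬ (0:Int) < evaluation := by omega
    have e1 : ¬ (1:Int) < evaluation := by omega
    have e2 : ¬ (2:Int) < evaluation := by omega
    have e3 : ¬ (3:Int) < evaluation := by omega
    have e4 : ¬ (4:Int) < evaluation := by omega
    have hn : max 0 (min 5 evaluation) = (0:Int) := by omega
    simp [output_evaluation_to_star, output_evaluation_to_star_loop,
          output_evaluation_to_star_alt, e0, e1, e2, e3, e4, hn]
    decide
  · rcases (by omega : evaluation < 5 ∨ 5 ≤ evaluation) with h5 | h5
    · interval_cases evaluation <;>
        simp [output_evaluation_to_star, output_evaluation_to_star_loop,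
              output_evaluation_to_star_alt] <;> decide
    · have e0 : (0:Int) < evaluation := by omega
      have e1 : (1:Int) < evaluation := by omega
      have e2 : (2:Int) < evaluation := by omega
      have e3 : (3:Int) < evaluation := by omega
      have e4 : (4:Int) < evaluation := by omega
      have hn : max 0 (min 5 evaluation) = (5:Int) := by omega
      simp [output_evaluation_to_star, output_evaluation_to_star_loop,
            output_evaluation_to_star_alt, e0, e1, e2, e3, e4, hn]
      decide

-- ===== VERDICT (by name: the statement is the Claim_ definition above) =====
theorem output_evaluation_to_star_spec : Claim_equal_output_evaluation_to_star := by
  intro evaluation _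
  exact output_evaluation_to_star_cases evaluation
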